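-- pv_equiv track=rewrite | github.com/jmmiddour/CSPT19 | GCA_practice/PalindromeCutting.py | palindromeCutting
-- ===== SOURCE A (Python) =====
-- def palindromeCutting(s):
-- 	switch = True
-- 	if len(s) <= 1:
-- 		return s
-- 	if s == None or s == s[::-1]:
-- 		return ""
--
-- 	while switch:
-- 		max_pal = 0
-- 		switch = False
-- 		for i in range(len(s)+1):
-- 			if len(s[:i]) > 1 and s[:i] == s[:i][::-1]:
-- 				max_pal = i
-- 		if max_pal >= 2:
-- 			s = s[max_pal:]
-- 			switch = True
--
-- 	return s
-- ===== SOURCE B (Python) =====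
-- def _is_pal(t):
--     # recursive two-end palindrome test
--     return len(t) < 2 or (t[0] == t[-1] and _is_pal(t[1:-1]))
--
-- def palindromeCutting(s):
--     if len(s) <= 1:
--         return s
--     if _is_pal(s):
--         return ""
--     while True:
--         k = len(s)
--         while k >= 2 and not _is_pal(s[:k]):
--             k -= 1
--         if k < 2:
--             return s
--         s = s[k:]
-- ===== Notes on version B (the rewrite author's own statement) =====
-- stated objective: faster
-- what changed: B finds the longest palindromic prefix by a descending scan with early exit and tests palindromes with a recursive two-end comparison that bails at the first mismatch, instead of A's ascending scan over every prefix tracking a maximum with full slice-and-reverse checks.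
import Mathlib
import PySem

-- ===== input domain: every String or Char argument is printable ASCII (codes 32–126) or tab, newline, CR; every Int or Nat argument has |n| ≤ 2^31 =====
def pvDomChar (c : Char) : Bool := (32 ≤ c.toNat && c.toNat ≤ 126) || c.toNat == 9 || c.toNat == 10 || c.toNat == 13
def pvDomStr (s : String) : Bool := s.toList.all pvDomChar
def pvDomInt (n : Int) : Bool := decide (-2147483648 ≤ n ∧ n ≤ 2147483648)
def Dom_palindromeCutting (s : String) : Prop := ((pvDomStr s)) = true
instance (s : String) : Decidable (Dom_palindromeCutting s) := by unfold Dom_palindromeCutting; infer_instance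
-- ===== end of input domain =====

-- B replaces A's ascending max-tracking scan over every prefix (with slice-reversal
-- palindrome tests) by a descending early-exit scan with a recursive two-end palindrome
-- test; objective: alternative algorithm.

-- ===== PORT A =====
-- 'for i in range(len(s)+1): if len(s[:i]) > 1 and s[:i] == s[:i][::-1]: max_pal = i'
-- (s[:i][::-1] is the reverse of the slice: PySem.List.slice?_none_none_neg_one is exact)
def pvA_maxPal (l : List Char) : Int :=
  (PySem.List.pyRange 0 ((l.length : Int) + 1) 1).foldl
    (fun m i =>
      let p := PySem.List.slice l none (some i)
      if 1 < p.length ∧ p = p.reverse then i else m) 0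

-- bound on the fold's accumulator, cited by pvA_loop's decreasing_by
theorem pvA_foldl_bound (l : List Char) (n : Int) :
    ∀ (xs : List Int) (m : Int), (∀ i ∈ xs, 0 ≤ i ∧ i ≤ n) → 0 ≤ m ∧ m ≤ n →
      0 ≤ xs.foldl (fun m i =>
            let p := PySem.List.slice l none (some i)
            if 1 < p.length ∧ p = p.reverse then i else m) m ∧
      xs.foldl (fun m i =>
            let p := PySem.List.slice l none (some i)
            if 1 < p.length ∧ p = p.reverse then i else m) m ≤ n := by
  intro xs
  induction xs with
  | nil => intro m _ hm; simpa using hm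
  | cons x xs ih =>
    intro m hmem hm
    simp only [List.foldl_cons]
    apply ih
    · intro i hi; exact hmem i (List.mem_cons_of_mem _ hi)
    · have hx := hmem x (List.mem_cons_self ..)
      split_ifs <;> simp_all

theorem pvA_maxPal_bounds (l : List Char) :
    0 ≤ pvA_maxPal l ∧ pvA_maxPal l ≤ (l.length : Int) := by
  unfold pvA_maxPal
  apply pvA_foldl_bound
  · intro i hi
    rw [PySem.List.mem_pyRange_one] at hi
    omega
  · omega

-- the 'while switch' loop: strip s[max_pal:] while max_pal ≥ 2
def pvA_loop (l : List Char) : List Char :=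
  if _h : 2 ≤ pvA_maxPal l then pvA_loop (PySem.List.slice l (some (pvA_maxPal l))) else l
  termination_by l.length
  decreasing_by
    have hb := pvA_maxPal_bounds l
    rw [PySem.List.slice_from l (by omega : (0:Int) ≤ pvA_maxPal l)]
    simp only [List.length_drop]
    omega

def palindromeCutting (s : String) : String :=
  if s.toList.length ≤ 1 then s
  -- 's == None' is always False for a str; 's == s[::-1]' (PySem.List.slice?_none_none_neg_one)
  else if s.toList = s.toList.reverse then ""
  else String.ofList (pvA_loop s.toList)

-- ===== PORT B =====
-- recursive two-end palindrome test: len(t) < 2 or (t[0] == t[-1] and _is_pal(t[1:-1]))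
def pvB_isPal (t : List Char) : Bool :=
  if t.length < 2 then true
  else (PySem.List.pyGetD t 0 ' ' == PySem.List.pyGetD t (-1) ' ')
        && pvB_isPal (PySem.List.slice t (some 1) (some (-1)))
  termination_by t.length
  decreasing_by
    rename_i hlt
    have ht : t ≠ [] := by rintro rfl; simp at hlt
    simp only [PySem.List.length_slice]
    simp [PySem.List.clampIdx, ht]
    omega

-- 'while k >= 2 and not _is_pal(s[:k]): k -= 1'
def pvB_cut (l : List Char) (k : Nat) : Nat :=
  if 2 ≤ k ∧ pvB_isPal (PySem.List.slice l none (some (k : Int))) = false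
  then pvB_cut l (k - 1) else k
  termination_by k

-- the k ≤ start bound, cited by pvB_loop's decreasing_by
theorem pvB_cut_le (l : List Char) : ∀ k, pvB_cut l k ≤ k := by
  intro k
  induction k using Nat.strong_induction_on with
  | _ k ih =>
    unfold pvB_cut
    split
    · next h => have := ih (k - 1) (by omega); omega
    · omega

-- 'while True: k = len(s); …; if k < 2: return s; s = s[k:]'
def pvB_loop (l : List Char) : List Char :=
  if _h : pvB_cut l l.length < 2 then l
  else pvB_loop (PySem.List.slice l (some ((pvB_cut l l.length : Nat) : Int)))
  termination_by l.length
  decreasing_by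
    have hle := pvB_cut_le l l.length
    rw [PySem.List.slice_from_natCast]
    simp only [List.length_drop]
    omega

def palindromeCutting_alt (s : String) : String :=
  if s.toList.length ≤ 1 then s
  else if pvB_isPal s.toList then ""
  else String.ofList (pvB_loop s.toList)

-- ===== PRECONDITION & SPEC =====
def Spec_palindromeCutting (s : String) (out : String) : Prop := out = palindromeCutting_alt s
instance (s : String) (out : String) : Decidable (Spec_palindromeCutting s out) := by unfold Spec_palindromeCutting; infer_instance

-- ===== CLAIM (what is proved, stated in full; the proofs are below) =====
def Claim_equal_palindromeCutting : Prop := ∀ (s : String), Dom_palindromeCutting s → Spec_palindromeCutting s (palindromeCutting s)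

-- ===== LEMMAS AND PROOFS =====

-- t[1:-1] on a cons with nonempty tail is the middle of the list
theorem pv_slice_middle (a : Char) (r : List Char) (hr : r ≠ []) :
    PySem.List.slice (a :: r) (some 1) (some (-1)) = r.dropLast := by
  have hr1 : 1 ≤ r.length := List.length_pos_of_ne_nil hr
  simp [PySem.List.slice, PySem.List.clampIdx, List.dropLast_eq_take]
  split_ifs <;> omega

-- a two-ended cons/append list equals its reversal iff its ends agree and its middle does
theorem pv_pal_decomp (a b : Char) (d : List Char) :
    (a :: (d ++ [b]) = (a :: (d ++ [b])).reverse) ↔ (a = b ∧ d = d.reverse) := by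
  have hrev : (a :: (d ++ [b])).reverse = b :: (d.reverse ++ [a]) := by simp
  rw [hrev, List.cons.injEq]
  constructor
  · rintro ⟨rfl, h2⟩
    exact ⟨rfl, (List.append_left_inj [a]).mp h2⟩
  · rintro ⟨rfl, hd⟩
    exact ⟨rfl, by rw [← hd]⟩

-- the recursive two-end test decides 'the list equals its reversal'
theorem pvB_isPal_iff_aux : ∀ (n : Nat) (t : List Char), t.length ≤ n →
    (pvB_isPal t = true ↔ t = t.reverse) := by
  intro n
  induction n using Nat.strong_induction_on with
  | _ n ih =>
    intro t hn
    by_cases hl : t.length < 2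
    · rw [pvB_isPal.eq_def, if_pos hl]
      match t, hl with
      | [], _ => simp
      | [a], _ => simp
    · rw [pvB_isPal.eq_def, if_neg hl]
      match t, hl, hn with
      | a :: r, hl, hn =>
        have hr : r ≠ [] := by rintro rfl; simp at hl
        obtain ⟨d, b, rfl⟩ : ∃ d b, r = d ++ [b] :=
          ⟨r.dropLast, r.getLast hr, (List.dropLast_append_getLast hr).symm⟩
        have hget0 : PySem.List.pyGetD (a :: (d ++ [b])) 0 ' ' = a :=
          PySem.List.pyGetD_zero_cons ..
        have hshape : a :: (d ++ [b]) = (a :: d) ++ [b] := by simp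
        have hget1 : PySem.List.pyGetD (a :: (d ++ [b])) (-1) ' ' = b := by
          rw [hshape]; exact PySem.List.pyGetD_neg_one_append_singleton ..
        have hmid : PySem.List.slice (a :: (d ++ [b])) (some 1) (some (-1)) = d := by
          rw [pv_slice_middle a (d ++ [b]) (by simp), List.dropLast_concat]
        have hIH : pvB_isPal d = true ↔ d = d.reverse := by
          apply ih (n - 1) (by simp at hl hn; omega)
          simp at hn; omega
        rw [hget0, hget1, hmid, pv_pal_decomp]
        simp [hIH]

-- pvG l k: value of A's max_pal after the ascending scan has processed i = 0 .. k
def pvG (l : List Char) : Nat → Nat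
  | 0 => 0
  | (k+1) => if 1 < (List.take (k+1) l).length ∧ List.take (k+1) l = (List.take (k+1) l).reverse
             then k+1 else pvG l k

theorem pvG_succ (l : List Char) (k : Nat) :
    pvG l (k+1) = if 1 < (List.take (k+1) l).length ∧ List.take (k+1) l = (List.take (k+1) l).reverse
                  then k+1 else pvG l k := rfl

theorem pvG_le (l : List Char) : ∀ k, pvG l k ≤ k := by
  intro k
  induction k with
  | zero => simp [pvG]
  | succ k ih => unfold pvG; split <;> omega

theorem pvA_fold_eq_pvG (l : List Char) :
    ∀ k : Nat, (PySem.List.pyRange 0 ((k : Int) + 1) 1).foldl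
      (fun m i =>
        let p := PySem.List.slice l none (some i)
        if 1 < p.length ∧ p = p.reverse then i else m) 0 = (pvG l k : Int) := by
  intro k
  induction k with
  | zero =>
    rw [show ((0 : Nat) : Int) + 1 = 0 + 1 by norm_num, PySem.List.pyRange_one_singleton]
    simp [pvG, PySem.List.slice_to l (by norm_num : (0:Int) ≤ 0)]
  | succ k ih =>
    rw [show ((k + 1 : Nat) : Int) + 1 = ((k : Int) + 1) + 1 by push_cast; ring,
        PySem.List.pyRange_one_succ_right (by positivity), List.foldl_append, ih]
    simp only [List.foldl_cons, List.foldl_nil]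
    rw [show ((k : Int) + 1) = ((k + 1 : Nat) : Int) by push_cast; ring,
        PySem.List.slice_to_natCast, pvG_succ]
    split_ifs <;> simp

theorem pvA_maxPal_eq_pvG (l : List Char) : pvA_maxPal l = (pvG l l.length : Int) := by
  unfold pvA_maxPal
  exact pvA_fold_eq_pvG l l.length

-- the ascending max-tracking scan and the descending early-exit scan agree
theorem pv_cut_G (l : List Char) :
    ∀ k, k ≤ l.length →
      pvG l k = pvB_cut l k ∨ (pvG l k = 0 ∧ pvB_cut l k < 2) := by
  intro k
  induction k with
  | zero => intro _; left; rw [pvB_cut.eq_def]; simp [pvG]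
  | succ k ih =>
    intro hk
    have hlen : (List.take (k+1) l).length = k + 1 := by simp; omega
    have hslice : PySem.List.slice l none (some ((k+1 : Nat) : Int)) = List.take (k+1) l :=
      PySem.List.slice_to_natCast ..
    rcases Nat.eq_zero_or_pos k with rfl | hk1
    · right
      constructor
      · rw [pvG_succ, if_neg (by rintro ⟨h1, -⟩; omega)]
        rfl
      · rw [pvB_cut.eq_def, if_neg (by rintro ⟨h1, -⟩; omega)]
        omega
    · have hiff := pvB_isPal_iff_aux (List.take (k+1) l).length (List.take (k+1) l) le_rfl
      by_cases hp : pvB_isPal (List.take (k+1) l) = true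
      · left
        rw [pvG_succ, if_pos ⟨by omega, hiff.1 hp⟩,
            pvB_cut.eq_def, if_neg (by rintro ⟨-, hf⟩; rw [hslice, hp] at hf; simp at hf)]
      · have hGs : pvG l (k+1) = pvG l k := by
          rw [pvG_succ, if_neg (by rintro ⟨-, hpe⟩; exact hp (hiff.2 hpe))]
        have hCs : pvB_cut l (k+1) = pvB_cut l k := by
          rw [pvB_cut.eq_def, if_pos ⟨by omega, by rw [hslice]; simpa using hp⟩]
          simp only [Nat.add_sub_cancel]
        rw [hGs, hCs]
        exact ih (by omega)

-- the two whole-loop strippers agree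
theorem pv_loop_aux : ∀ (n : Nat) (l : List Char), l.length ≤ n → pvA_loop l = pvB_loop l := by
  intro n
  induction n using Nat.strong_induction_on with
  | _ n ih =>
    intro l hl
    have hmp := pvA_maxPal_eq_pvG l
    have hGle := pvG_le l l.length
    have hCle := pvB_cut_le l l.length
    rcases pv_cut_G l l.length le_rfl with hcg | ⟨hg0, hc2⟩
    · by_cases h2 : 2 ≤ pvG l l.length
      · have hA : (2:Int) ≤ pvA_maxPal l := by rw [hmp]; exact_mod_cast h2
        have hB : ¬ pvB_cut l l.length < 2 := by omega
        rw [pvA_loop.eq_def, dif_pos hA, pvB_loop.eq_def, dif_neg hB]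
        have hsame : PySem.List.slice l (some (pvA_maxPal l))
            = PySem.List.slice l (some ((pvB_cut l l.length : Nat) : Int)) := by
          rw [hmp, hcg]
        rw [hsame, PySem.List.slice_from_natCast]
        apply ih (n - 2) (by omega)
        simp only [List.length_drop]
        omega
      · rw [pvA_loop.eq_def, dif_neg (by rw [hmp]; exact_mod_cast h2), pvB_loop.eq_def,
            dif_pos (by omega)]
    · rw [pvA_loop.eq_def, dif_neg (by rw [hmp, hg0]; norm_num), pvB_loop.eq_def, dif_pos hc2]

theorem pv_loop_eq (l : List Char) : pvA_loop l = pvB_loop l :=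
  pv_loop_aux l.length l le_rfl

-- ===== VERDICT (by name: the statement is the Claim_ definition above) =====
theorem palindromeCutting_spec : Claim_equal_palindromeCutting := by
  intro s _
  unfold Spec_palindromeCutting palindromeCutting palindromeCutting_alt
  by_cases h1 : s.toList.length ≤ 1
  · rw [if_pos h1, if_pos h1]
  · rw [if_neg h1, if_neg h1]
    by_cases h2 : s.toList = s.toList.reverse
    · rw [if_pos h2,
        if_pos ((pvB_isPal_iff_aux s.toList.length s.toList le_rfl).2 h2)]
    · rw [if_neg h2,
        if_neg (fun hh => h2 ((pvB_isPal_iff_aux s.toList.length s.toList le_rfl).1 hh)),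
        pv_loop_eq]
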